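-- pv_equiv track=rewrite | github.com/fjeos/Algorithm | 프로그래머스/2/389479. 서버 증설 횟수/서버 증설 횟수.py | solution
-- ===== SOURCE A (Python) =====
-- from collections import deque
--
-- def solution(players, m, k):
--     answer = 0
--     servers = deque()
--     now_servers, n = 0, 0
--     for player in players:
--         for i in range(len(servers)):
--             servers[i][1] += 1
--         while servers and servers[0][1] == k:
--             servers.popleft()
--         if player < m:
--             continue
--         if len(servers) * m <= player:
--             n = player // m
--             if n <= len(servers):
--                 continue
--             answer += n - len(servers)
--             while len(servers) < n:
--                 servers.append([0, 0])
--     return answer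
-- ===== SOURCE B (Python) =====
-- from collections import deque
--
-- def solution(players, m, k):
--     # O(len(players)) amortized: a running active-server count plus a queue of
--     # (expiry hour, batch size); A instead ages every live server every hour.
--     answer = 0
--     active = 0
--     q = deque()  # (hour at which the batch expires, number of servers in it)
--     for t, player in enumerate(players):
--         while q and q[0][0] == t:
--             active -= q.popleft()[1]
--         if player >= m and active * m <= player:
--             n = player // m
--             if n > active:
--                 q.append((t + k, n - active))
--                 answer += n - active
--                 active = n
--     return answer
-- ===== Notes on version B (the rewrite author's own statement) =====
-- stated objective: faster
-- what changed: B replaces A's per-hour pass that ages every live server (O(T*S), S the number of live servers which can reach player//m) by a single enumerate pass keeping a running active-server count and a queue of (expiry hour, batch size) pairs, popped when their hour arrives.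
-- outside the precondition, e.g. on solution([5], 0, 1): A raises ZeroDivisionError, B raises ZeroDivisionError
import Mathlib
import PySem

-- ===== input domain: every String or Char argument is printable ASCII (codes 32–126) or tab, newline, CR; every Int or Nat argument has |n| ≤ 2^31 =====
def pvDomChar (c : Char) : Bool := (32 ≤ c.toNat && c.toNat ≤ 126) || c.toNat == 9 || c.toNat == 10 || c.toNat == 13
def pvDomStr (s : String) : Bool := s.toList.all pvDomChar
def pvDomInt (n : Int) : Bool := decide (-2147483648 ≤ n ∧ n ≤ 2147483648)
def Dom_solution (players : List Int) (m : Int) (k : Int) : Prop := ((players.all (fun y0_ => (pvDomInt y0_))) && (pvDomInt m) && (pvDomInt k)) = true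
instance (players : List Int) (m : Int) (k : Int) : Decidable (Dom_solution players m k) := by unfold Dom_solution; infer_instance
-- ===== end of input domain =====

-- B replaces A's per-hour aging of every live server by a running active count plus a
-- queue of (expiry hour, batch size): an asymptotically faster single pass.

-- ===== PORT A =====
def solStepA (m k : Int) (st : Int × List Int) (player : Int) : Int × List Int :=
  let answer := st.1
  -- servers holds each live server's age; [0, age] in Python, the 0 is never read
  let servers := st.2.map (fun a => a + 1)            -- for i in range(len(servers)): servers[i][1] += 1
  let servers := servers.dropWhile (fun a => a == k)  -- while servers and servers[0][1] == k: popleft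
  if player < m then (answer, servers)
  else if (servers.length : Int) * m ≤ player then
    let n := PySem.Int.floordiv player m
    if n ≤ (servers.length : Int) then (answer, servers)
    else (answer + (n - (servers.length : Int)),
          servers ++ List.replicate (n - (servers.length : Int)).toNat 0)  -- while len < n: append
  else (answer, servers)

def solution (players : List Int) (m : Int) (k : Int) : Int :=
  (players.foldl (solStepA m k) (0, [])).1

-- ===== PORT B =====
def solPop (t : Int) (active : Int) (q : List (Int × Int)) : Int × List (Int × Int) :=
  match q with
  | [] => (active, [])
  | (e, c) :: rest => if e == t then solPop t (active - c) rest else (active, (e, c) :: rest)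

def solStepB (m k : Int) (st : Int × Int × List (Int × Int)) (tp : Int × Int) : Int × Int × List (Int × Int) :=
  let answer := st.1
  let p := solPop tp.1 st.2.1 st.2.2        -- while q and q[0][0] == t: active -= q.popleft()[1]
  let active := p.1
  let q := p.2
  if m ≤ tp.2 ∧ active * m ≤ tp.2 then
    let n := PySem.Int.floordiv tp.2 m
    if active < n then (answer + (n - active), n, q ++ [(tp.1 + k, n - active)])
    else (answer, active, q)
  else (answer, active, q)

def solution_alt (players : List Int) (m : Int) (k : Int) : Int :=
  ((PySem.List.enumerate players).foldl (solStepB m k) (0, 0, [])).1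

-- ===== PRECONDITION & SPEC =====
-- Pre_ excludes exactly the inputs where Python A raises ZeroDivisionError
-- (m = 0 with some player ≥ 0 reaching 'player // m'); B raises there too.
def Pre_solution (players : List Int) (m : Int) (_k : Int) : Prop :=
  m ≠ 0 ∨ ∀ p ∈ players, p < 0
instance (players : List Int) (m : Int) (k : Int) : Decidable (Pre_solution players m k) := by
  unfold Pre_solution; infer_instance

def pvWitness_solution : List Int × Int × Int := ([10, 22, 3], 3, 2)

def Spec_solution (players : List Int) (m : Int) (k : Int) (out : Int) : Prop := out = solution_alt players m k
instance (players : List Int) (m : Int) (k : Int) (out : Int) : Decidable (Spec_solution players m k out) := by unfold Spec_solution; infer_instance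

-- ===== CLAIM (what is proved, stated in full; the proofs are below) =====
def Claim_equal_solution : Prop := ∀ (players : List Int) (m : Int) (k : Int), Dom_solution players m k → Pre_solution players m k → Spec_solution players m k (solution players m k)

-- ===== LEMMAS AND PROOFS =====

-- Invariant at the start of hour t: A's age list is B's queue, batch by batch;
-- a batch (e, c) is c servers of current age (t - 1 + k) - e.
def SolInv (t k : Int) (servers : List Int) (active : Int) (q : List (Int × Int)) : Prop :=
  servers = q.flatMap (fun ec => List.replicate ec.2.toNat ((t - 1 + k) - ec.1)) ∧
  active = (servers.length : Int) ∧
  (∀ ec ∈ q, 1 ≤ ec.2 ∧ ec.1 ≤ t - 1 + k ∧ (1 ≤ k → t ≤ ec.1)) ∧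
  q.Pairwise (fun a b => a.1 < b.1)

lemma dropWhile_replicate_append {α : Type} (p : α → Bool) (n : Nat) (a : α)
    (l : List α) (hp : p a = true) :
    (List.replicate n a ++ l).dropWhile p = l.dropWhile p := by
  induction n with
  | zero => simp
  | succ n ih => simp [List.replicate_succ, hp, ih]

lemma dropWhile_stop (p : Int → Bool) (v : Int) (c : Int) (tail : List Int)
    (hc : 1 ≤ c) (hv : p v = false) :
    (List.replicate c.toNat v ++ tail).dropWhile p = List.replicate c.toNat v ++ tail := by
  obtain ⟨n, hn⟩ : ∃ n, c.toNat = n + 1 := ⟨c.toNat - 1, by omega⟩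
  rw [hn, List.replicate_succ]
  simp [hv]

lemma solMid (t k : Int) (servers : List Int) (active : Int) (q : List (Int × Int))
    (h : SolInv t k servers active q) :
    ((servers.map (fun a => a + 1)).dropWhile (fun a => a == k) =
      (solPop t active q).2.flatMap (fun ec => List.replicate ec.2.toNat ((t + k) - ec.1))) ∧
    (solPop t active q).1 = (((servers.map (fun a => a + 1)).dropWhile (fun a => a == k)).length : Int) ∧
    (∀ ec ∈ (solPop t active q).2, 1 ≤ ec.2 ∧ ec.1 ≤ t - 1 + k ∧ (1 ≤ k → t + 1 ≤ ec.1)) ∧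
    (solPop t active q).2.Pairwise (fun a b => a.1 < b.1) := by
  obtain ⟨hrep, hlen, hq, hpw⟩ := h
  subst hrep
  have hmap : ((q.flatMap fun ec => List.replicate ec.2.toNat (t - 1 + k - ec.1)).map (fun a => a + 1))
      = q.flatMap (fun ec => List.replicate ec.2.toNat ((t + k) - ec.1)) := by
    rw [List.map_flatMap]
    congr 1; funext ec; rw [List.map_replicate]; congr 1; ring
  rw [hmap]
  have hlen' : active = ((q.flatMap (fun ec => List.replicate ec.2.toNat ((t + k) - ec.1))).length : Int) := by
    rw [← hmap, List.length_map]; exact hlen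
  clear hlen
  rcases q with _ | ⟨⟨e, c⟩, rest⟩
  · simp only [List.flatMap_nil, List.length_nil] at hlen' ⊢
    simp [solPop, hlen']
  · obtain ⟨hc1, hce, hck⟩ := hq (e, c) (List.mem_cons_self)
    have hqr : ∀ ec ∈ rest, 1 ≤ ec.2 ∧ ec.1 ≤ t - 1 + k ∧ (1 ≤ k → t ≤ ec.1) :=
      fun ec hec => hq ec (List.mem_cons_of_mem _ hec)
    rw [List.pairwise_cons] at hpw
    obtain ⟨hlt, hpwr⟩ := hpw
    by_cases he : e = t
    · -- the front batch expires this hour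
      have hk1 : 1 ≤ k := by omega
      have hdrop : ((((e, c) :: rest).flatMap fun ec => List.replicate ec.2.toNat (t + k - ec.1)).dropWhile
          (fun a => a == k)) = rest.flatMap (fun ec => List.replicate ec.2.toNat ((t + k) - ec.1)) := by
        rw [List.flatMap_cons]
        have hke : t + k - e = k := by omega
        rw [hke, dropWhile_replicate_append _ _ _ _ (by simp)]
        rcases rest with _ | ⟨⟨e2, c2⟩, rest2⟩
        · simp
        · rw [List.flatMap_cons]
          exact dropWhile_stop _ _ _ _ (hqr (e2, c2) (List.mem_cons_self)).1
            (by simp only [beq_eq_false_iff_ne, ne_eq]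
                have := hlt (e2, c2) (List.mem_cons_self); simp at this; omega)
      have hpop : solPop t active ((e, c) :: rest) = (active - c, rest) := by
        rcases rest with _ | ⟨⟨e2, c2⟩, rest2⟩
        · simp [solPop, he]
        · have := hlt (e2, c2) (List.mem_cons_self)
          simp only at this
          simp [solPop, he, show ¬ (e2 = t) from by omega]
      rw [hdrop, hpop]
      refine ⟨rfl, ?_, ?_, hpwr⟩
      · rw [List.flatMap_cons, List.length_append, List.length_replicate] at hlen'
        push_cast at hlen' ⊢; omega
      · intro ec hec
        obtain ⟨d1, d2, _⟩ := hqr ec hec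
        have := hlt ec hec
        exact ⟨d1, d2, fun _ => by omega⟩
    · -- nothing expires: the front batch's new age differs from k
      have hstop : ((((e, c) :: rest).flatMap fun ec => List.replicate ec.2.toNat (t + k - ec.1)).dropWhile
          (fun a => a == k)) = ((e, c) :: rest).flatMap fun ec => List.replicate ec.2.toNat (t + k - ec.1) := by
        rw [List.flatMap_cons]
        exact dropWhile_stop _ _ _ _ hc1
          (by simp only [beq_eq_false_iff_ne, ne_eq]; omega)
      have hpop : solPop t active ((e, c) :: rest) = (active, (e, c) :: rest) := by
        simp [solPop, he]
      rw [hstop, hpop]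
      refine ⟨rfl, hlen', ?_, List.pairwise_cons.2 ⟨hlt, hpwr⟩⟩
      intro ec hec
      rcases List.mem_cons.1 hec with h1 | h1
      · subst h1; exact ⟨hc1, hce, fun hk => by have := hck hk; omega⟩
      · obtain ⟨d1, d2, d3⟩ := hqr ec h1
        have := hlt ec h1
        exact ⟨d1, d2, fun hk => by have := hck hk; omega⟩

lemma solInvSucc (t k active1 : Int) (s1 : List Int) (q1 : List (Int × Int))
    (h1 : s1 = q1.flatMap (fun ec => List.replicate ec.2.toNat ((t + k) - ec.1)))
    (h2 : active1 = (s1.length : Int))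
    (h3 : ∀ ec ∈ q1, 1 ≤ ec.2 ∧ ec.1 ≤ t - 1 + k ∧ (1 ≤ k → t + 1 ≤ ec.1))
    (h4 : q1.Pairwise (fun a b => a.1 < b.1)) :
    SolInv (t + 1) k s1 active1 q1 := by
  refine ⟨?_, h2, ?_, h4⟩
  · simpa [show t + 1 - 1 + k = t + k from by ring] using h1
  · intro ec hec
    obtain ⟨d1, d2, d3⟩ := h3 ec hec
    exact ⟨d1, by omega, fun hk => d3 hk⟩

lemma solInvSuccAdd (t k n : Int) (s1 : List Int) (q1 : List (Int × Int))
    (h1 : s1 = q1.flatMap (fun ec => List.replicate ec.2.toNat ((t + k) - ec.1)))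
    (h3 : ∀ ec ∈ q1, 1 ≤ ec.2 ∧ ec.1 ≤ t - 1 + k ∧ (1 ≤ k → t + 1 ≤ ec.1))
    (h4 : q1.Pairwise (fun a b => a.1 < b.1))
    (hn : (s1.length : Int) < n) :
    SolInv (t + 1) k (s1 ++ List.replicate (n - (s1.length : Int)).toNat 0) n
      (q1 ++ [(t + k, n - (s1.length : Int))]) := by
  refine ⟨?_, ?_, ?_, ?_⟩
  · rw [List.flatMap_append, List.flatMap_cons, List.flatMap_nil]
    simp only [show t + 1 - 1 + k = t + k from by ring]
    rw [← h1]
    simp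
  · rw [List.length_append, List.length_replicate]
    push_cast; omega
  · intro ec hec
    rcases List.mem_append.1 hec with h1m | h1m
    · obtain ⟨d1, d2, d3⟩ := h3 ec h1m
      exact ⟨d1, by omega, fun hk => d3 hk⟩
    · simp only [List.mem_singleton] at h1m
      subst h1m
      exact ⟨by omega, by omega, fun hk => by omega⟩
  · rw [List.pairwise_append]
    refine ⟨h4, List.pairwise_singleton _ _, ?_⟩
    intro a ha b hb
    simp only [List.mem_singleton] at hb
    subst hb
    have := (h3 a ha).2.1
    simp only
    omega

lemma solStep (m k t ans active : Int) (servers : List Int) (q : List (Int × Int)) (p : Int)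
    (h : SolInv t k servers active q) :
    (solStepA m k (ans, servers) p).1 = (solStepB m k (ans, active, q) (t, p)).1 ∧
    SolInv (t + 1) k (solStepA m k (ans, servers) p).2
      (solStepB m k (ans, active, q) (t, p)).2.1 (solStepB m k (ans, active, q) (t, p)).2.2 := by
  obtain ⟨hrep, hlen, hq3, hpw⟩ := solMid t k servers active q h
  simp only [solStepA, solStepB]
  set s1 := (servers.map (fun a => a + 1)).dropWhile (fun a => a == k) with hs1
  set pr := solPop t active q with hpr
  rw [hlen]
  split_ifs with h1 h2 h3 h4 h5 h6 h7 h8 h9 <;>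
    first
      | exact ⟨rfl, solInvSucc t k (s1.length : Int) s1 pr.2 hrep rfl hq3 hpw⟩
      | (exact ⟨rfl, solInvSuccAdd t k (PySem.Int.floordiv p m) s1 pr.2 hrep hq3 hpw (by omega)⟩)
      | omega

lemma solMain (m k : Int) (ps : List Int) (t ans active : Int) (servers : List Int)
    (q : List (Int × Int)) (h : SolInv t k servers active q) :
    (ps.foldl (solStepA m k) (ans, servers)).1 =
      ((PySem.List.enumerate ps t).foldl (solStepB m k) (ans, active, q)).1 := by
  induction ps generalizing t ans active servers q with
  | nil => simp [PySem.List.enumerate_nil]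
  | cons p ps ih =>
    rw [PySem.List.enumerate_cons, List.foldl_cons, List.foldl_cons]
    obtain ⟨hans, hinv⟩ := solStep m k t ans active servers q p h
    rcases hA : solStepA m k (ans, servers) p with ⟨a1, s1⟩
    rcases hB : solStepB m k (ans, active, q) (t, p) with ⟨b1, act1, q1⟩
    rw [hA, hB] at hans hinv
    simp only at hans hinv
    rw [hans]
    exact ih (t + 1) b1 act1 s1 q1 hinv

-- ===== VERDICT (by name: the statement is the Claim_ definition above) =====
theorem solution_spec : Claim_equal_solution := by
  intro players m k _ _
  unfold Spec_solution solution solution_alt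
  exact solMain m k players 0 0 0 [] [] (by simp [SolInv])
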